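-- pv_equiv track=rewrite | github.com/nhatluan064/network-monitoring | main.py | identify_service
-- ===== SOURCE A (Python) =====
-- def identify_service(domain):
--     d = domain.lower()
--     if any(x in d for x in ['youtube', 'googlevideo', 'ytimg']): return 'YouTube'
--     if any(x in d for x in ['facebook', 'fbcdn', 'fbsbx', 'messenger']): return 'Facebook'
--     if any(x in d for x in ['google', 'gstatic', 'gvt1', 'gvt2', 'gmail', 'googleapis']): return 'Google'
--     if any(x in d for x in ['tiktok', 'byteoversea', 'ibyteimg']): return 'TikTok'
--     if any(x in d for x in ['netflix', 'nflxvideo']): return 'Netflix'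
--     if any(x in d for x in ['shopee']): return 'Shopee'
--     if any(x in d for x in ['lazada']): return 'Lazada'
--     if any(x in d for x in ['zalo']): return 'Zalo'
--     if any(x in d for x in ['instagram', 'cdninstagram']): return 'Instagram'
--     if any(x in d for x in ['microsoft', 'live.com', 'office', 'bing', 'azure', 'msn', 'windows']): return 'Microsoft'
--     if any(x in d for x in ['apple', 'icloud', 'aaplimg']): return 'Apple'
--     if any(x in d for x in ['steam', 'valve']): return 'Steam'
--     if any(x in d for x in ['roblox']): return 'Roblox'
--     if any(x in d for x in ['garena']): return 'Garena'
--     if any(x in d for x in ['cellphones', 'sforum']): return 'Cellphones'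
--     if any(x in d for x in ['wattpad']): return 'Wattpad'
--     if any(x in d for x in ['truyen', 'manga', 'comic', 'nettruyen', 'fuhu', '8cache', 'blogtruyen']): return 'Comics/Stories'
--     return 'Other'
-- ===== SOURCE B (Python) =====
-- # B: inverted index -- one flat (pattern, priority-rank) list; collect all matching
-- # patterns and take the MINIMUM rank (no early return / no per-service branching),
-- # then map the rank back to a service name.
-- NAMES = ['YouTube', 'Facebook', 'Google', 'TikTok', 'Netflix', 'Shopee', 'Lazada',
--          'Zalo', 'Instagram', 'Microsoft', 'Apple', 'Steam', 'Roblox', 'Garena',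
--          'Cellphones', 'Wattpad', 'Comics/Stories']
--
-- PATTERN_RANK = [
--     ('youtube', 0), ('googlevideo', 0), ('ytimg', 0),
--     ('facebook', 1), ('fbcdn', 1), ('fbsbx', 1), ('messenger', 1),
--     ('google', 2), ('gstatic', 2), ('gvt1', 2), ('gvt2', 2), ('gmail', 2), ('googleapis', 2),
--     ('tiktok', 3), ('byteoversea', 3), ('ibyteimg', 3),
--     ('netflix', 4), ('nflxvideo', 4),
--     ('shopee', 5),
--     ('lazada', 6),
--     ('zalo', 7),
--     ('instagram', 8), ('cdninstagram', 8),
--     ('microsoft', 9), ('live.com', 9), ('office', 9), ('bing', 9), ('azure', 9), ('msn', 9), ('windows', 9),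
--     ('apple', 10), ('icloud', 10), ('aaplimg', 10),
--     ('steam', 11), ('valve', 11),
--     ('roblox', 12),
--     ('garena', 13),
--     ('cellphones', 14), ('sforum', 14),
--     ('wattpad', 15),
--     ('truyen', 16), ('manga', 16), ('comic', 16), ('nettruyen', 16), ('fuhu', 16), ('8cache', 16), ('blogtruyen', 16),
-- ]
--
-- def identify_service(domain):
--     d = domain.lower()
--     best = min((r for p, r in PATTERN_RANK if p in d), default=len(NAMES))
--     return NAMES[best] if best < len(NAMES) else 'Other'
-- ===== Notes on version B (the rewrite author's own statement) =====
-- stated objective: alternative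
-- what changed: Replaces the 17-branch first-hit if/any chain with an inverted index: one flat (pattern, priority-rank) list scanned without early return, taking the minimum rank over all matching patterns and mapping it back to a name.
import Mathlib
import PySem

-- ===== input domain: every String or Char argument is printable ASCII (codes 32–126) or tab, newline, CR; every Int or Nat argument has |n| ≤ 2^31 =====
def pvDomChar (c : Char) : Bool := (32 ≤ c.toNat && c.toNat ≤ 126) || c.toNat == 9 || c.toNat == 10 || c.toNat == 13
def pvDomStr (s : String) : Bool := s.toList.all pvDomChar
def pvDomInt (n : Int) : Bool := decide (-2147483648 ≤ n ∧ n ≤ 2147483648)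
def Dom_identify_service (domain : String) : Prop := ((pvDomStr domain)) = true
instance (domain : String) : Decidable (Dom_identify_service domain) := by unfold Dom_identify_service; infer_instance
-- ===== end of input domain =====

-- B replaces A's 17-branch first-hit if/any chain with an inverted index: one flat
-- (pattern, rank) list scanned without early return, taking the MINIMUM rank over all
-- matching patterns and mapping it back to a service name (alternative; same output).

-- ===== PORT A =====
def identify_service (domain : String) : String :=
  let d := PySem.Str.lower domain
  if ["youtube", "googlevideo", "ytimg"].any (fun x => PySem.Str.isIn x d) then "YouTube"
  else if ["facebook", "fbcdn", "fbsbx", "messenger"].any (fun x => PySem.Str.isIn x d) then "Facebook"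
  else if ["google", "gstatic", "gvt1", "gvt2", "gmail", "googleapis"].any (fun x => PySem.Str.isIn x d) then "Google"
  else if ["tiktok", "byteoversea", "ibyteimg"].any (fun x => PySem.Str.isIn x d) then "TikTok"
  else if ["netflix", "nflxvideo"].any (fun x => PySem.Str.isIn x d) then "Netflix"
  else if ["shopee"].any (fun x => PySem.Str.isIn x d) then "Shopee"
  else if ["lazada"].any (fun x => PySem.Str.isIn x d) then "Lazada"
  else if ["zalo"].any (fun x => PySem.Str.isIn x d) then "Zalo"
  else if ["instagram", "cdninstagram"].any (fun x => PySem.Str.isIn x d) then "Instagram"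
  else if ["microsoft", "live.com", "office", "bing", "azure", "msn", "windows"].any (fun x => PySem.Str.isIn x d) then "Microsoft"
  else if ["apple", "icloud", "aaplimg"].any (fun x => PySem.Str.isIn x d) then "Apple"
  else if ["steam", "valve"].any (fun x => PySem.Str.isIn x d) then "Steam"
  else if ["roblox"].any (fun x => PySem.Str.isIn x d) then "Roblox"
  else if ["garena"].any (fun x => PySem.Str.isIn x d) then "Garena"
  else if ["cellphones", "sforum"].any (fun x => PySem.Str.isIn x d) then "Cellphones"
  else if ["wattpad"].any (fun x => PySem.Str.isIn x d) then "Wattpad"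
  else if ["truyen", "manga", "comic", "nettruyen", "fuhu", "8cache", "blogtruyen"].any (fun x => PySem.Str.isIn x d) then "Comics/Stories"
  else "Other"

-- ===== PORT B =====
-- the NAMES list of Source B
def pvNames : List String :=
  ["YouTube", "Facebook", "Google", "TikTok", "Netflix", "Shopee", "Lazada",
   "Zalo", "Instagram", "Microsoft", "Apple", "Steam", "Roblox", "Garena",
   "Cellphones", "Wattpad", "Comics/Stories"]

-- the flat PATTERN_RANK inverted index of Source B
def pvPatternRank : List (String × Int) :=
  [("youtube", 0), ("googlevideo", 0), ("ytimg", 0),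
   ("facebook", 1), ("fbcdn", 1), ("fbsbx", 1), ("messenger", 1),
   ("google", 2), ("gstatic", 2), ("gvt1", 2), ("gvt2", 2), ("gmail", 2), ("googleapis", 2),
   ("tiktok", 3), ("byteoversea", 3), ("ibyteimg", 3),
   ("netflix", 4), ("nflxvideo", 4),
   ("shopee", 5),
   ("lazada", 6),
   ("zalo", 7),
   ("instagram", 8), ("cdninstagram", 8),
   ("microsoft", 9), ("live.com", 9), ("office", 9), ("bing", 9), ("azure", 9), ("msn", 9), ("windows", 9),
   ("apple", 10), ("icloud", 10), ("aaplimg", 10),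
   ("steam", 11), ("valve", 11),
   ("roblox", 12),
   ("garena", 13),
   ("cellphones", 14), ("sforum", 14),
   ("wattpad", 15),
   ("truyen", 16), ("manga", 16), ("comic", 16), ("nettruyen", 16), ("fuhu", 16), ("8cache", 16), ("blogtruyen", 16)]

-- one step of Source B's "min over matching ranks, default len(NAMES)":
-- min(...) over a filtered scan is ported as this fold step
def pvMinStep (d : String) (b : Int) (pr : String × Int) : Int :=
  if PySem.Str.isIn pr.1 d then min b pr.2 else b

def identify_service_alt (domain : String) : String :=
  let d := PySem.Str.lower domain
  let best := pvPatternRank.foldl (pvMinStep d) 17   -- 17 = len(NAMES), the min's default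
  -- guard 'best < 17' makes NAMES[best] in range, so the .getD "" default is unreachable
  if best < 17 then (PySem.List.pyGet? pvNames best).getD "" else "Other"

-- ===== PRECONDITION & SPEC =====
def Spec_identify_service (domain : String) (out : String) : Prop := out = identify_service_alt domain
instance (domain : String) (out : String) : Decidable (Spec_identify_service domain out) := by unfold Spec_identify_service; infer_instance

-- ===== CLAIM (what is proved, stated in full; the proofs are below) =====
def Claim_equal_identify_service : Prop := ∀ (domain : String), Dom_identify_service domain → Spec_identify_service domain (identify_service domain)

-- ===== LEMMAS AND PROOFS =====

-- A's if-chain, abstracted as a first-hit scan over an ordered table (proof helper)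
def pvChain : List (String × List String) → String → String
  | [], _ => "Other"
  | (name, pats) :: t, d => if pats.any (fun p => PySem.Str.isIn p d) then name else pvChain t d

-- the inverted index of a table, with ranks starting at k (proof helper)
def pvFlatStart (k : Int) : List (String × List String) → List (String × Int)
  | [] => []
  | (_, pats) :: t => pats.map (fun p => (p, k)) ++ pvFlatStart (k + 1) t

-- A's table
def pvServices : List (String × List String) :=
  [("YouTube", ["youtube", "googlevideo", "ytimg"]),
   ("Facebook", ["facebook", "fbcdn", "fbsbx", "messenger"]),
   ("Google", ["google", "gstatic", "gvt1", "gvt2", "gmail", "googleapis"]),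
   ("TikTok", ["tiktok", "byteoversea", "ibyteimg"]),
   ("Netflix", ["netflix", "nflxvideo"]),
   ("Shopee", ["shopee"]),
   ("Lazada", ["lazada"]),
   ("Zalo", ["zalo"]),
   ("Instagram", ["instagram", "cdninstagram"]),
   ("Microsoft", ["microsoft", "live.com", "office", "bing", "azure", "msn", "windows"]),
   ("Apple", ["apple", "icloud", "aaplimg"]),
   ("Steam", ["steam", "valve"]),
   ("Roblox", ["roblox"]),
   ("Garena", ["garena"]),
   ("Cellphones", ["cellphones", "sforum"]),
   ("Wattpad", ["wattpad"]),
   ("Comics/Stories", ["truyen", "manga", "comic", "nettruyen", "fuhu", "8cache", "blogtruyen"])]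

theorem pvFold_id (d : String) (l : List (String × Int)) (b : Int)
    (h : ∀ x ∈ l, PySem.Str.isIn x.1 d = false) : l.foldl (pvMinStep d) b = b := by
  induction l generalizing b with
  | nil => rfl
  | cons x t ih =>
      simp only [List.foldl_cons, pvMinStep, h x (List.mem_cons_self ..)]
      exact ih b (fun y hy => h y (List.mem_cons_of_mem _ hy))

theorem pvFold_const (d : String) (l : List (String × Int)) (b : Int)
    (h : ∀ x ∈ l, b ≤ x.2) : l.foldl (pvMinStep d) b = b := by
  induction l with
  | nil => rfl
  | cons x t ih =>
      have hb : min b x.2 = b := min_eq_left (h x (List.mem_cons_self ..))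
      simp only [List.foldl_cons, pvMinStep]
      split
      · rw [hb]; exact ih (fun y hy => h y (List.mem_cons_of_mem _ hy))
      · exact ih (fun y hy => h y (List.mem_cons_of_mem _ hy))

theorem pvFold_lb (d : String) (l : List (String × Int)) (b m : Int)
    (hb : m ≤ b) (h : ∀ x ∈ l, m ≤ x.2) : m ≤ l.foldl (pvMinStep d) b := by
  induction l generalizing b with
  | nil => exact hb
  | cons x t ih =>
      simp only [List.foldl_cons, pvMinStep]
      split
      · exact ih _ (le_min hb (h x (List.mem_cons_self ..))) (fun y hy => h y (List.mem_cons_of_mem _ hy))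
      · exact ih _ hb (fun y hy => h y (List.mem_cons_of_mem _ hy))

theorem pvFold_hit (d : String) (l : List (String × Int)) (b i : Int)
    (hall : ∀ x ∈ l, x.2 = i) (hex : ∃ x ∈ l, PySem.Str.isIn x.1 d = true)
    (hlt : i < b) : l.foldl (pvMinStep d) b = i := by
  induction l generalizing b with
  | nil => simp at hex
  | cons x t ih =>
      simp only [List.foldl_cons, pvMinStep]
      by_cases hx : PySem.Str.isIn x.1 d = true
      · simp only [hx, if_true]
        have hxi : x.2 = i := hall x (List.mem_cons_self ..)
        have hmin : min b x.2 = i := by rw [hxi]; exact min_eq_right (le_of_lt hlt)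
        rw [hmin]
        exact pvFold_const d t i (fun y hy => le_of_eq (hall y (List.mem_cons_of_mem _ hy)).symm)
      · simp only [hx]
        rcases hex with ⟨y, hy, hyin⟩
        rcases List.mem_cons.mp hy with rfl | hyt
        · exact absurd hyin hx
        · exact ih b (fun z hz => hall z (List.mem_cons_of_mem _ hz)) ⟨y, hyt, hyin⟩ hlt

theorem pvFlat_ranks (t : List (String × List String)) (k : Int) :
    ∀ x ∈ pvFlatStart k t, k ≤ x.2 := by
  induction t generalizing k with
  | nil => intro x hx; simp [pvFlatStart] at hx
  | cons g t ih =>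
      intro x hx
      obtain ⟨name, pats⟩ := g
      simp only [pvFlatStart, List.mem_append, List.mem_map] at hx
      rcases hx with ⟨p, _, rfl⟩ | hx
      · exact le_refl k
      · exact le_trans (by omega) (ih (k + 1) x hx)

theorem pvGet_cons (a : String) (l : List String) (i : Int) (h : 0 ≤ i) :
    PySem.List.pyGet? (a :: l) (i + 1) = PySem.List.pyGet? l i := by
  obtain ⟨n, rfl⟩ : ∃ n : ℕ, i = (n : Int) := ⟨i.toNat, (Int.toNat_of_nonneg h).symm⟩
  exact PySem.List.pyGet?_cons_succ ..

-- the core correspondence: a first-hit chain scan equals looking up the minimum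
-- matching rank of the inverted index (ranks starting at k, default k + length)
theorem pvChain_eq_min (table : List (String × List String)) (k : Int) (d : String) :
    pvChain table d =
      (if (pvFlatStart k table).foldl (pvMinStep d) (k + (table.length : Int)) < k + (table.length : Int)
       then (PySem.List.pyGet? (table.map Prod.fst)
              ((pvFlatStart k table).foldl (pvMinStep d) (k + (table.length : Int)) - k)).getD ""
       else "Other") := by
  induction table generalizing k with
  | nil => simp [pvChain, pvFlatStart]
  | cons g t ih =>
      obtain ⟨name, pats⟩ := g
      have hlen : ((((name, pats) :: t).length : Nat) : Int) = (t.length : Int) + 1 := by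
        push_cast [List.length_cons]; ring
      rw [hlen]
      simp only [pvFlatStart, List.foldl_append, List.map_cons]
      by_cases h : pats.any (fun p => PySem.Str.isIn p d) = true
      · -- some pattern of the head group matches: the fold lands exactly on rank k
        have hgrp : (pats.map (fun p => (p, k))).foldl (pvMinStep d) (k + ((t.length : Int) + 1)) = k := by
          apply pvFold_hit
          · intro x hx; rcases List.mem_map.mp hx with ⟨p, _, rfl⟩; rfl
          · rcases List.any_eq_true.mp h with ⟨p, hp, hpin⟩
            exact ⟨(p, k), List.mem_map.mpr ⟨p, hp, rfl⟩, hpin⟩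
          · have : (0 : Int) ≤ (t.length : Int) := Int.natCast_nonneg _
            omega
        have hrest : (pvFlatStart (k + 1) t).foldl (pvMinStep d) k = k :=
          pvFold_const d _ k (fun x hx => le_trans (by omega) (pvFlat_ranks t (k + 1) x hx))
        rw [hgrp, hrest]
        simp only [pvChain, h, if_true]
        rw [if_pos (by have : (0 : Int) ≤ (t.length : Int) := Int.natCast_nonneg _; omega)]
        rw [sub_self, PySem.List.pyGet?_zero_cons, Option.getD_some]
      · -- no pattern of the head group matches: skip the group and recurse
        have hnone : ∀ x ∈ pats.map (fun p => (p, k)), PySem.Str.isIn x.1 d = false := by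
          intro x hx; rcases List.mem_map.mp hx with ⟨p, hp, rfl⟩
          exact Bool.eq_false_iff.mpr (fun hc => h (List.any_eq_true.mpr ⟨p, hp, hc⟩))
        rw [pvFold_id d _ _ hnone]
        have hb0 : k + ((t.length : Int) + 1) = (k + 1) + (t.length : Int) := by ring
        rw [hb0]
        have hlb : k + 1 ≤ (pvFlatStart (k + 1) t).foldl (pvMinStep d) ((k + 1) + (t.length : Int)) :=
          pvFold_lb d _ _ _ (by have : (0 : Int) ≤ (t.length : Int) := Int.natCast_nonneg _; omega)
            (pvFlat_ranks t (k + 1))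
        simp only [pvChain, h, Bool.false_eq_true, if_false]
        rw [ih (k + 1)]
        set best := (pvFlatStart (k + 1) t).foldl (pvMinStep d) ((k + 1) + (t.length : Int)) with hbest
        have hcmpiff : best < (k + 1) + (t.length : Int) ↔ best < k + ((t.length : Int) + 1) := by omega
        by_cases hcmp : best < (k + 1) + (t.length : Int)
        · rw [if_pos hcmp, if_pos ((by omega : best < (k + 1) + (t.length : Int) → best < (k+1) + (t.length:Int)) hcmp)]
          have hidx : best - k = (best - (k + 1)) + 1 := by omega
          rw [hidx, pvGet_cons _ _ _ (by omega)]
        · rw [if_neg hcmp, if_neg hcmp]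

-- the literal constants of B are exactly the inverted index of A's table
theorem pvFlat_eq : pvFlatStart 0 pvServices = pvPatternRank := by decide
theorem pvNames_eq : pvServices.map Prod.fst = pvNames := by decide

-- A's if-chain is the first-hit scan of pvServices
theorem pvA_eq_chain (domain : String) :
    identify_service domain = pvChain pvServices (PySem.Str.lower domain) := by
  unfold identify_service pvServices
  simp only [pvChain]

-- ===== VERDICT (by name: the statement is the Claim_ definition above) =====
theorem identify_service_spec : Claim_equal_identify_service := by
  intro domain _
  unfold Spec_identify_service
  rw [pvA_eq_chain]
  have h := pvChain_eq_min pvServices 0 (PySem.Str.lower domain)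
  rw [pvFlat_eq, pvNames_eq] at h
  have hlen : (0 : Int) + ((pvServices.length : Nat) : Int) = 17 := by decide
  rw [hlen] at h
  simp only [sub_zero] at h
  rw [h]
  rfl
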